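-- pv_equiv track=rewrite | github.com/stokrotka24/engineering-project | backend/algorithms/test/ranking_quality_test.py | infinity_norm_for_indices_difference
-- ===== SOURCE A (Python) =====
-- def infinity_norm_for_indices_difference(l1: list, l2: list):
--     max_difference = 0
--     for (index1, elem) in enumerate(l1):
--         index2 = l2.index(elem)
--         difference = abs(index2 - index1)
--         if difference > max_difference:
--             max_difference = difference
--     return max_difference
-- ===== SOURCE B (Python) =====
-- def infinity_norm_for_indices_difference(l1: list, l2: list):
--     first = {}
--     for j, x in enumerate(l2):
--         if x not in first:
--             first[x] = j
--     extremes = {}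
--     for i, x in enumerate(l1):
--         lo = extremes[x][0] if x in extremes else i
--         extremes[x] = (lo, i)
--     best = 0
--     for x, (lo, hi) in extremes.items():
--         j = first[x]
--         best = max(best, abs(j - lo), abs(j - hi))
--     return best
-- ===== Notes on version B (the rewrite author's own statement) =====
-- stated objective: alternative
-- what changed: Instead of computing |first2(x)-i| for every position i of l1 as A does, B aggregates per distinct element only its first and last index in l1 and, using convexity of i -> |j-i|, takes max(|j-lo|,|j-hi|) over the distinct elements, so the max pass runs over distinct elements, not positions.
import Mathlib
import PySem

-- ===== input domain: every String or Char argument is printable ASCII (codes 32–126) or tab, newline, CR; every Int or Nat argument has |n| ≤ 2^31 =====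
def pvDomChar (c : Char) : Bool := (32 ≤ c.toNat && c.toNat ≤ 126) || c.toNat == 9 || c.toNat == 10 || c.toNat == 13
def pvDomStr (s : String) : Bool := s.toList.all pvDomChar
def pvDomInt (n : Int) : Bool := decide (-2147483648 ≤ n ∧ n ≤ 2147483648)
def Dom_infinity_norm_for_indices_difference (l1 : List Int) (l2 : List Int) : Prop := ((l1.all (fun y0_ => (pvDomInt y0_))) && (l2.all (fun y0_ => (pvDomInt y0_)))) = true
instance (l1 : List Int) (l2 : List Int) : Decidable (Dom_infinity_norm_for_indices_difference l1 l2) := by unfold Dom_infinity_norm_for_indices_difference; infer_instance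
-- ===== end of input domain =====

-- B aggregates only the first and last l1-index of each distinct element and maximizes max(|j-lo|,|j-hi|) over distinct elements (convexity of i ↦ |j-i|), instead of A's per-position l2.index scan (alternative algorithm).


-- ===== PORT A =====
-- l2.index(elem) raises ValueError when elem ∉ l2; the 'none' branch is unreachable under Pre_.
def infinity_norm_for_indices_difference (l1 : List Int) (l2 : List Int) : Int :=
  (PySem.List.enumerate l1).foldl
    (fun max_difference p =>
      match PySem.List.index? l2 p.2 with
      | some index2 =>
        let difference := |(index2 : Int) - p.1|
        if difference > max_difference then difference else max_difference
      | none => max_difference) 0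

-- ===== PORT B =====
-- first loop of Source B: dict mapping each element of l2 to its first index
def pvFirstIdx (l2 : List Int) : PySem.Dict Int Int :=
  (PySem.List.enumerate l2).foldl
    (fun d p => if d.contains p.2 then d else d.insert p.2 p.1) PySem.Dict.empty

-- second loop of Source B: dict mapping each element of l1 to its (first, last) index in l1
def pvExtremes (l1 : List Int) : PySem.Dict Int (Int × Int) :=
  (PySem.List.enumerate l1).foldl
    (fun d p =>
      let lo := if d.contains p.2 then (d.getD p.2 (p.1, p.1)).1 else p.1
      d.insert p.2 (lo, p.1)) PySem.Dict.empty

def infinity_norm_for_indices_difference_alt (l1 : List Int) (l2 : List Int) : Int :=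
  let first := pvFirstIdx l2
  let extremes := pvExtremes l1
  extremes.items.foldl
    (fun best q =>
      let j := first.getD q.1 0   -- first[x]; KeyError unreachable under Pre_
      max (max best |j - q.2.1|) |j - q.2.2|) 0

-- ===== PRECONDITION & SPEC =====
-- Pre_ excludes exactly the inputs where some element of l1 is absent from l2: there A raises ValueError (and B raises KeyError).
def Pre_infinity_norm_for_indices_difference (l1 : List Int) (l2 : List Int) : Prop :=
  ∀ x ∈ l1, x ∈ l2
instance (l1 : List Int) (l2 : List Int) : Decidable (Pre_infinity_norm_for_indices_difference l1 l2) := by unfold Pre_infinity_norm_for_indices_difference; infer_instance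
def pvWitness_infinity_norm_for_indices_difference : List Int × List Int := ([1, 2, 1], [2, 3, 1])

def Spec_infinity_norm_for_indices_difference (l1 : List Int) (l2 : List Int) (out : Int) : Prop := out = infinity_norm_for_indices_difference_alt l1 l2
instance (l1 : List Int) (l2 : List Int) (out : Int) : Decidable (Spec_infinity_norm_for_indices_difference l1 l2 out) := by unfold Spec_infinity_norm_for_indices_difference; infer_instance

-- ===== CLAIM (what is proved, stated in full; the proofs are below) =====
def Claim_equal_infinity_norm_for_indices_difference : Prop := ∀ (l1 : List Int) (l2 : List Int), Dom_infinity_norm_for_indices_difference l1 l2 → Pre_infinity_norm_for_indices_difference l1 l2 → Spec_infinity_norm_for_indices_difference l1 l2 (infinity_norm_for_indices_difference l1 l2)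

-- ===== LEMMAS AND PROOFS =====

-- the first-occurrence fold looks up like index? (generalized over start index and initial dict)
theorem pvFirstIdx_fold_get? (l : List Int) :
    ∀ (s : Int) (d : PySem.Dict Int Int) (x : Int),
      ((PySem.List.enumerate l s).foldl
        (fun d p => if d.contains p.2 then d else d.insert p.2 p.1) d).get? x =
      if d.contains x then d.get? x
      else (PySem.List.index? l x).map (fun n : Nat => s + (n : Int)) := by
  induction l with
  | nil =>
    intro s d x
    rw [PySem.List.enumerate_nil, List.foldl_nil]
    by_cases hdx : d.contains x = true
    · rw [if_pos hdx]
    · rw [if_neg hdx, (PySem.List.index?_eq_none_iff _ _).mpr (by simp), Option.map_none]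
      rw [PySem.Dict.get?_eq_none_iff_contains d x]
      simpa using hdx
  | cons y t ih =>
    intro s d x
    rw [PySem.List.enumerate_cons, List.foldl_cons, ih]
    by_cases hxy : x = y
    · subst hxy
      rw [PySem.List.index?_cons_self]
      by_cases hdx : d.contains x = true
      · simp [hdx]
      · simp [hdx, PySem.Dict.contains_insert_self, PySem.Dict.get?_insert_self]
    · rw [PySem.List.index?_cons_of_ne _ (Ne.symm hxy)]
      rcases hidx : PySem.List.index? t x with _ | n
      · rw [hidx] at *
        by_cases hdy : d.contains y = true
        · simp [hdy]
        · by_cases hdx : d.contains x = true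
          · simp [hdy, hdx, PySem.Dict.contains_insert,
              PySem.Dict.get?_insert_of_ne d _ hxy]
          · simp [hdy, hdx, PySem.Dict.contains_insert, hxy]
      · rw [hidx] at *
        by_cases hdy : d.contains y = true
        · by_cases hdx : d.contains x = true
          · simp [hdy, hdx]
          · simp only [hdy, if_true, hdx, Bool.false_eq_true, if_false,
              Option.map_some]
            congr 1
            push_cast
            ring
        · by_cases hdx : d.contains x = true
          · simp [hdy, hdx, PySem.Dict.contains_insert,
              PySem.Dict.get?_insert_of_ne d _ hxy]
          · have hxyb : (x == y) = false := by simp [hxy]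
            simp only [hdy, Bool.false_eq_true, if_false,
              PySem.Dict.contains_insert, hxyb, Bool.false_or, hdx,
              Option.map_some]
            congr 1
            push_cast
            ring

theorem pvFirstIdx_getD (l2 : List Int) (x : Int) (n : Nat)
    (h : PySem.List.index? l2 x = some n) :
    (pvFirstIdx l2).getD x 0 = (n : Int) := by
  unfold pvFirstIdx
  rw [PySem.Dict.getD_eq_get?_getD, pvFirstIdx_fold_get?]
  rw [PySem.List.index?_eq_idxOf?] at h
  simp [h, PySem.Dict.contains_empty]

-- characterization of the extremes dict: lookup returns the first and last index of x in l1
theorem pv_en_bound {t : List Int} {i x : Int} (h : (i, x) ∈ PySem.List.enumerate t 0) :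
    0 ≤ i ∧ i < (t.length : Int) ∧ x ∈ t := by
  rcases (PySem.List.mem_enumerate_iff _ _ _).1 h with ⟨k, hk, he⟩
  have h1 : i = 0 + (k : Int) := congrArg Prod.fst he
  have h2 : x = t[k] := congrArg Prod.snd he
  refine ⟨by omega, by omega, h2 ▸ List.getElem_mem hk⟩

theorem pvExtremes_char (l1 : List Int) (x : Int) :
    match (pvExtremes l1).get? x with
    | none => x ∉ l1
    | some q => (q.1, x) ∈ PySem.List.enumerate l1 0 ∧ (q.2, x) ∈ PySem.List.enumerate l1 0 ∧
        ∀ i : Int, (i, x) ∈ PySem.List.enumerate l1 0 → q.1 ≤ i ∧ i ≤ q.2 := by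
  induction l1 using List.reverseRecOn with
  | nil => simp [pvExtremes, PySem.List.enumerate_nil, PySem.Dict.get?_empty]
  | append_singleton t y ih =>
    unfold pvExtremes at *
    rw [PySem.List.enumerate_append, List.foldl_append] at *
    rw [PySem.List.enumerate_cons, PySem.List.enumerate_nil] at *
    simp only [List.foldl_cons, List.foldl_nil]
    set D := (PySem.List.enumerate t 0).foldl
      (fun d p =>
        let lo := if d.contains p.2 then (d.getD p.2 (p.1, p.1)).1 else p.1
        d.insert p.2 (lo, p.1)) PySem.Dict.empty with hD
    by_cases hxy : x = y
    · subst hxy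
      rw [PySem.Dict.get?_insert_self]
      by_cases hc : D.contains x = true
      · rcases hq : D.get? x with _ | q
        · rw [PySem.Dict.get?_eq_none_iff_contains] at hq; simp [hq] at hc
        · rw [hq] at ih
          obtain ⟨h1, h2, h3⟩ := ih
          rw [if_pos hc, PySem.Dict.getD_eq_get?_getD, hq, Option.getD_some]
          have hb1 := pv_en_bound h1
          refine ⟨List.mem_append_left _ h1, List.mem_append_right _ (by simp), ?_⟩
          intro i hi
          rcases List.mem_append.1 hi with hi | hi
          · have hb := pv_en_bound hi
            have := h3 i hi
            constructor <;> omega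
          · simp only [List.mem_singleton, Prod.mk.injEq] at hi
            constructor <;> omega
      · rw [if_neg hc]
        have hn : D.get? x = none := (PySem.Dict.get?_eq_none_iff_contains D x).mpr (by simpa using hc)
        rw [hn] at ih
        refine ⟨List.mem_append_right _ (by simp), List.mem_append_right _ (by simp), ?_⟩
        intro i hi
        rcases List.mem_append.1 hi with hi | hi
        · exact absurd (pv_en_bound hi).2.2 ih
        · simp only [List.mem_singleton, Prod.mk.injEq] at hi
          constructor <;> omega
    · rw [PySem.Dict.get?_insert_of_ne _ _ hxy]
      rcases hq : D.get? x with _ | q <;> rw [hq] at ih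
      · intro hmem
        rcases List.mem_append.1 hmem with hm | hm
        · exact ih hm
        · simp only [List.mem_singleton] at hm; exact hxy hm
      · obtain ⟨h1, h2, h3⟩ := ih
        refine ⟨List.mem_append_left _ h1, List.mem_append_left _ h2, ?_⟩
        intro i hi
        rcases List.mem_append.1 hi with hi | hi
        · exact h3 i hi
        · simp only [List.mem_singleton, Prod.mk.injEq] at hi
          exact absurd hi.2 hxy


theorem pvExtremes_nodup_keys (l1 : List Int) : (pvExtremes l1).keys.Nodup := by
  unfold pvExtremes
  exact PySem.Dict.nodup_keys_foldl_insert_key _ Prod.snd _ _ PySem.Dict.nodup_keys_empty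

-- generic running-max lemmas over Int lists
theorem pv_foldl_max_le (l : List Int) : ∀ (a c : Int), a ≤ c → (∀ x ∈ l, x ≤ c) → l.foldl max a ≤ c := by
  induction l with
  | nil => intro a c h _; simpa using h
  | cons y t ih =>
    intro a c ha hall
    rw [List.foldl_cons]
    exact ih _ _ (max_le ha (hall y (List.mem_cons_self))) (fun x hx => hall x (List.mem_cons_of_mem _ hx))

theorem pv_le_foldl_max_init (l : List Int) : ∀ a : Int, a ≤ l.foldl max a := by
  induction l with
  | nil => intro a; simp
  | cons y t ih => intro a; rw [List.foldl_cons]; exact le_trans (le_max_left a y) (ih _)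

theorem pv_le_foldl_max_mem (l : List Int) : ∀ (a x : Int), x ∈ l → x ≤ l.foldl max a := by
  induction l with
  | nil => intro a x hx; cases hx
  | cons y t ih =>
    intro a x hx
    rw [List.foldl_cons]
    rcases List.mem_cons.1 hx with rfl | hx
    · exact le_trans (le_max_right a x) (pv_le_foldl_max_init t _)
    · exact ih _ _ hx

-- shape lemmas: both ports' folds are running maxima over explicit lists
theorem pv_foldl_max_map {α : Type} (l : List α) (g : α → Int) : ∀ a : Int,
    l.foldl (fun m p => max m (g p)) a = (l.map g).foldl max a := by
  induction l with
  | nil => intro a; simp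
  | cons y t ih => intro a; simp [ih]

theorem pv_foldl_max2_flat {α : Type} (l : List α) (u v : α → Int) : ∀ a : Int,
    l.foldl (fun m q => max (max m (u q)) (v q)) a
      = (l.flatMap fun q => [u q, v q]).foldl max a := by
  induction l with
  | nil => intro a; simp
  | cons y t ih =>
    intro a
    simp only [List.foldl_cons, List.flatMap_cons, List.cons_append, List.nil_append]
    exact ih _

-- ===== VERDICT (by name: the statement is the Claim_ definition above) =====
theorem infinity_norm_for_indices_difference_spec : Claim_equal_infinity_norm_for_indices_difference := by
  intro l1 l2 _ hpre
  unfold Spec_infinity_norm_for_indices_difference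
  have hA : infinity_norm_for_indices_difference l1 l2
      = ((PySem.List.enumerate l1).map (fun p => |(pvFirstIdx l2).getD p.2 0 - p.1|)).foldl max 0 := by
    rw [← pv_foldl_max_map]
    unfold infinity_norm_for_indices_difference
    apply PySem.List.foldl_congr_mem
    intro m p hp
    have hmem : p.2 ∈ l1 := by
      rcases (PySem.List.mem_enumerate_iff _ _ _).1 hp with ⟨k, hk, rfl⟩
      exact List.getElem_mem hk
    rcases Option.isSome_iff_exists.1 ((PySem.List.index?_isSome_iff _ _).2 (hpre _ hmem)) with ⟨n, hn⟩
    rw [hn, pvFirstIdx_getD l2 p.2 n hn]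
    simp only []
    rcases Int.lt_or_le m |(n : Int) - p.1| with h | h
    · rw [if_pos h, max_eq_right (le_of_lt h)]
    · rw [if_neg (not_lt.2 h), max_eq_left h]
  have hB : infinity_norm_for_indices_difference_alt l1 l2
      = ((pvExtremes l1).items.flatMap
          (fun q => [|(pvFirstIdx l2).getD q.1 0 - q.2.1|, |(pvFirstIdx l2).getD q.1 0 - q.2.2|])).foldl max 0 := by
    rw [← pv_foldl_max2_flat]
    rfl
  rw [hA, hB]
  apply le_antisymm
  · apply pv_foldl_max_le
    · exact pv_le_foldl_max_init _ 0
    · intro d hd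
      rcases List.mem_map.1 hd with ⟨p, hp, rfl⟩
      obtain ⟨i, x⟩ := p
      have hx1 : x ∈ l1 := (pv_en_bound hp).2.2
      have hchar := pvExtremes_char l1 x
      rcases hq : (pvExtremes l1).get? x with _ | q
      · rw [hq] at hchar; exact absurd hx1 hchar
      rw [hq] at hchar
      obtain ⟨h1, h2, h3⟩ := hchar
      have hit : (x, q) ∈ (pvExtremes l1).items :=
        PySem.Dict.mem_items_of_get?_eq_some _ hq
      have hbounds := h3 i hp
      have a1 : (pvFirstIdx l2).getD x 0 - q.1 ≤ |(pvFirstIdx l2).getD x 0 - q.1| := le_abs_self _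
      have a2 : q.1 - (pvFirstIdx l2).getD x 0 ≤ |(pvFirstIdx l2).getD x 0 - q.1| := by
        rw [abs_sub_comm]; exact le_abs_self _
      have a3 : (pvFirstIdx l2).getD x 0 - q.2 ≤ |(pvFirstIdx l2).getD x 0 - q.2| := le_abs_self _
      have a4 : q.2 - (pvFirstIdx l2).getD x 0 ≤ |(pvFirstIdx l2).getD x 0 - q.2| := by
        rw [abs_sub_comm]; exact le_abs_self _
      have hcase : |(pvFirstIdx l2).getD x 0 - i| ≤ |(pvFirstIdx l2).getD x 0 - q.1|
          ∨ |(pvFirstIdx l2).getD x 0 - i| ≤ |(pvFirstIdx l2).getD x 0 - q.2| := by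
        rcases abs_cases ((pvFirstIdx l2).getD x 0 - i) with ⟨h5, _⟩ | ⟨h5, _⟩ <;> omega
      rcases hcase with hle | hle
      · exact le_trans hle (pv_le_foldl_max_mem _ _ _
          (List.mem_flatMap.2 ⟨(x, q), hit, by simp⟩))
      · exact le_trans hle (pv_le_foldl_max_mem _ _ _
          (List.mem_flatMap.2 ⟨(x, q), hit, by simp⟩))
  · apply pv_foldl_max_le
    · exact pv_le_foldl_max_init _ 0
    · intro d hd
      rcases List.mem_flatMap.1 hd with ⟨q, hq_items, hd2⟩
      obtain ⟨x, v⟩ := q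
      have hget : (pvExtremes l1).get? x = some v :=
        PySem.Dict.get?_of_mem_items _ hq_items (pvExtremes_nodup_keys l1)
      have hchar := pvExtremes_char l1 x
      rw [hget] at hchar
      obtain ⟨h1, h2, _⟩ := hchar
      simp only [List.mem_cons, List.not_mem_nil, or_false] at hd2
      rcases hd2 with rfl | rfl
      · exact pv_le_foldl_max_mem _ _ _ (List.mem_map.2 ⟨(v.1, x), h1, rfl⟩)
      · exact pv_le_foldl_max_mem _ _ _ (List.mem_map.2 ⟨(v.2, x), h2, rfl⟩)
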